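-- pv_equiv track=rewrite | github.com/Gausslab-SeoulOffice/problems | yunjae/noodle_factory.py | solution
-- ===== SOURCE A (Python) =====
-- import heapq
--
-- def solution(stock, dates, supplies, k):
--   result = 0
--
--   pq = []
--   while stock < k:                 # 하루 밀가루 1톤이므로, 둘은 서로 비교 가능
--     for i in range(len(dates)):
--       if dates[i] <= stock:
--         heapq.heappush(pq, -supplies[i])
--     stock += -heapq.heappop(pq)
--     result += 1
--
--   return result
-- ===== SOURCE B (Python) =====
-- def solution(stock, dates, supplies, k):
--     # Bulk greedy: supplies are reusable in A (it re-pushes every eligible supply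
--     # each day), so each day simply adds the max supply among dates <= stock.
--     # Jump whole segments with ceil division instead of simulating day by day.
--     result = 0
--     while stock < k:
--         m = 0            # best supply currently unlocked
--         nxt = k          # nearest future unlock (capped at k)
--         for d, s in zip(dates, supplies):
--             if d <= stock:
--                 if s > m:
--                     m = s
--             elif d < nxt:
--                 nxt = d
--         steps = -((stock - nxt) // m)   # ceil((nxt - stock) / m)
--         result += steps
--         stock += steps * m
--     return result
-- ===== Notes on version B (the rewrite author's own statement) =====
-- stated objective: alternative
-- what changed: B replaces A's day-by-day heap simulation (which re-pushes every unlocked supply each day, so each day just adds the current maximum supply) by segment jumps: one scan finds the current max supply and the next unlock date, and ceil division counts all days of the segment at once.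
-- outside the precondition, e.g. on solution(0, [0, 1], [5], 2): A returns 1, B returns 1
import Mathlib
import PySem

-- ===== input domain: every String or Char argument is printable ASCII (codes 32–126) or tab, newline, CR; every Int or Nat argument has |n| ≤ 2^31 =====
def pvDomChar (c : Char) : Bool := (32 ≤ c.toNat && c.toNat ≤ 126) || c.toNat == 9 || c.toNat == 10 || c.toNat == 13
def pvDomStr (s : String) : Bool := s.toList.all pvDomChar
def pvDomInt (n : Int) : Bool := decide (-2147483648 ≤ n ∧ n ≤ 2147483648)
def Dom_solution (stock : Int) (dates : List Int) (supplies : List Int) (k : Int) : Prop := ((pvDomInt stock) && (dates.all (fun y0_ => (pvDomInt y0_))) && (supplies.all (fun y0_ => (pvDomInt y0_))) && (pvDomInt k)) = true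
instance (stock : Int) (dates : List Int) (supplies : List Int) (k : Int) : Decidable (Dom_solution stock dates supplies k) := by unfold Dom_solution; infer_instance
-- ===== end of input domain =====

-- B replaces A's day-by-day heap simulation by segment jumps with ceil division (a different algorithm; not claimed faster).

-- ===== PORT A =====
-- the for-loop: push -supplies[i] for every i with dates[i] <= stock onto pq
def pushAll (dates supplies : List Int) (stock : Int) (pq : List Int) : List Int :=
  (PySem.List.pyRange 0 dates.length 1).foldl
    (fun acc i => if PySem.List.pyGetD dates i 0 ≤ stock then acc ++ [-(PySem.List.pyGetD supplies i 0)] else acc) pq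

-- the while-loop; pq is the heap as a multiset of its values (heappop = remove the minimum value),
-- fuel bounds the iteration count (each iteration adds ≥ 1 to stock on admitted inputs)
def runA (dates supplies : List Int) (k : Int) : Nat → Int → List Int → Int → Int
  | 0, _, _, result => result
  | fuel+1, stock, pq, result =>
    if stock < k then
      let pq' := pushAll dates supplies stock pq
      match PySem.List.min? pq' (fun x => x) with
      | none => result      -- Python raises IndexError here (empty heap); excluded by Pre_
      | some v => runA dates supplies k fuel (stock + (-v)) (pq'.erase v) (result + 1)
    else result

def solution (stock : Int) (dates : List Int) (supplies : List Int) (k : Int) : Int :=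
  runA dates supplies k (k - stock).toNat stock [] 0

-- ===== PORT B =====
-- one scan over zip(dates, supplies): running max m of unlocked supplies, nearest future unlock nxt (capped at k)
def scanB (stock k : Int) (pairs : List (Int × Int)) : Int × Int :=
  pairs.foldl (fun acc p =>
      if p.1 ≤ stock then (if acc.1 < p.2 then (p.2, acc.2) else acc)
      else if p.1 < acc.2 then (acc.1, p.1) else acc)
    (0, k)

-- the while-loop of B; fuel bounds the iteration count as for A
def runB (dates supplies : List Int) (k : Int) : Nat → Int → Int → Int
  | 0, _, result => result
  | fuel+1, stock, result =>
    if stock < k then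
      let ms := scanB stock k (dates.zip supplies)
      let steps := -(PySem.Int.floordiv (stock - ms.2) ms.1)
      runB dates supplies k fuel (stock + steps * ms.1) (result + steps)
    else result

def solution_alt (stock : Int) (dates : List Int) (supplies : List Int) (k : Int) : Int :=
  runB dates supplies k (k - stock).toNat stock 0

-- ===== PRECONDITION & SPEC =====
-- Pre_ excludes exactly the inputs where A does not return normally, plus inputs with len(dates) > len(supplies)
-- whose unmatched tail dates lie below k: there A raises IndexError whenever such a date unlocks, and returns only
-- accidentally when it never does.
def Pre_solution (stock : Int) (dates : List Int) (supplies : List Int) (k : Int) : Prop :=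
  stock < k →
    ((∃ i, i < dates.length ∧ i < supplies.length ∧ dates.getD i 0 ≤ stock ∧ 0 < supplies.getD i 0) ∧
     (∀ i, supplies.length ≤ i → i < dates.length → k ≤ dates.getD i 0))
instance (stock : Int) (dates : List Int) (supplies : List Int) (k : Int) : Decidable (Pre_solution stock dates supplies k) := by unfold Pre_solution; infer_instance

def pvWitness_solution : Int × List Int × List Int × Int := (4, [2, 5, 9], [3, 4, 2], 10)

def Spec_solution (stock : Int) (dates : List Int) (supplies : List Int) (k : Int) (out : Int) : Prop := out = solution_alt stock dates supplies k
instance (stock : Int) (dates : List Int) (supplies : List Int) (k : Int) (out : Int) : Decidable (Spec_solution stock dates supplies k out) := by unfold Spec_solution; infer_instance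

-- ===== CLAIM (what is proved, stated in full; the proofs are below) =====
def Claim_equal_solution : Prop := ∀ (stock : Int) (dates : List Int) (supplies : List Int) (k : Int), Dom_solution stock dates supplies k → Pre_solution stock dates supplies k → Spec_solution stock dates supplies k (solution stock dates supplies k)

-- ===== LEMMAS AND PROOFS =====

-- the per-day increment: max over unlocked supplies (0 if none), over the zipped lists
def mOf (L : List (Int × Int)) (s : Int) : Int :=
  L.foldl (fun m p => if p.1 ≤ s then max m p.2 else m) 0

-- the nearest unlock date after s, capped at k
def nOf (L : List (Int × Int)) (k s : Int) : Int :=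
  L.foldl (fun v p => if p.1 ≤ s then v else min v p.1) k

-- reference loop: one day at a time, adding mOf each day
def runG (L : List (Int × Int)) (k : Int) : Nat → Int → Int → Int
  | 0, _, r => r
  | f+1, s, r => if s < k then runG L k f (s + mOf L s) (r + 1) else r

def posElig (L : List (Int × Int)) (s : Int) : Prop := ∃ p ∈ L, p.1 ≤ s ∧ 0 < p.2

-- ---- facts about mOf ----
theorem foldl_max_init_le (L : List (Int × Int)) (s a : Int) :
    a ≤ L.foldl (fun m p => if p.1 ≤ s then max m p.2 else m) a := by
  induction L generalizing a with
  | nil => simp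
  | cons h t ih =>
    simp only [List.foldl_cons]
    refine le_trans ?_ (ih _)
    split <;> simp [le_max_left]

theorem foldl_max_le_bound (L : List (Int × Int)) (s a : Int) :
    ∀ p ∈ L, p.1 ≤ s → p.2 ≤ L.foldl (fun m p => if p.1 ≤ s then max m p.2 else m) a := by
  induction L generalizing a with
  | nil => simp
  | cons h t ih =>
    intro p hp hps
    simp only [List.foldl_cons]
    rcases List.mem_cons.mp hp with hp | hp
    · subst hp
      refine le_trans ?_ (foldl_max_init_le t s _)
      simp [hps, le_max_right]
    · exact ih _ p hp hps

theorem foldl_max_mem_or (L : List (Int × Int)) (s a : Int) :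
    L.foldl (fun m p => if p.1 ≤ s then max m p.2 else m) a = a ∨
    ∃ p ∈ L, p.1 ≤ s ∧ L.foldl (fun m p => if p.1 ≤ s then max m p.2 else m) a = p.2 := by
  induction L generalizing a with
  | nil => simp
  | cons h t ih =>
    simp only [List.foldl_cons]
    by_cases hc : h.1 ≤ s
    · simp only [hc, if_pos]
      rcases ih (max a h.2) with heq | ⟨p, hp, hps, heq⟩
      · by_cases hle : h.2 ≤ a
        · left; rw [heq]; omega
        · right; exact ⟨h, by simp, hc, by rw [heq]; omega⟩
      · right; exact ⟨p, by simp [hp], hps, heq⟩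
    · simp only [hc, if_neg (by exact hc)]
      rcases ih a with heq | ⟨p, hp, hps, heq⟩
      · left; exact heq
      · right; exact ⟨p, by simp [hp], hps, heq⟩

theorem mOf_pos (L : List (Int × Int)) (s : Int) (h : posElig L s) : 0 < mOf L s := by
  obtain ⟨p, hp, hps, hpos⟩ := h
  exact lt_of_lt_of_le hpos (foldl_max_le_bound L s 0 p hp hps)

theorem mOf_le (L : List (Int × Int)) (s : Int) : ∀ p ∈ L, p.1 ≤ s → p.2 ≤ mOf L s :=
  foldl_max_le_bound L s 0

theorem mOf_mem (L : List (Int × Int)) (s : Int) (h : posElig L s) :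
    ∃ p ∈ L, p.1 ≤ s ∧ mOf L s = p.2 := by
  rcases foldl_max_mem_or L s 0 with heq | hm
  · exfalso; have := mOf_pos L s h; unfold mOf at this; omega
  · exact hm

-- eligibility-congruence: mOf only depends on which pairs are unlocked
theorem mOf_congr_aux (L : List (Int × Int)) (s s' : Int)
    (h : ∀ p ∈ L, (p.1 ≤ s ↔ p.1 ≤ s')) : ∀ a : Int,
    L.foldl (fun m p => if p.1 ≤ s then max m p.2 else m) a =
    L.foldl (fun m p => if p.1 ≤ s' then max m p.2 else m) a := by
  induction L with
  | nil => intro a; rfl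
  | cons hd t ih =>
    intro a
    simp only [List.foldl_cons]
    have hhd := h hd (by simp)
    have ht : ∀ p ∈ t, (p.1 ≤ s ↔ p.1 ≤ s') := fun p hp => h p (by simp [hp])
    by_cases hc : hd.1 ≤ s
    · rw [if_pos hc, if_pos (hhd.mp hc)]; exact ih ht _
    · rw [if_neg hc, if_neg (fun hc' => hc (hhd.mpr hc'))]; exact ih ht _

theorem mOf_congr (L : List (Int × Int)) (s s' : Int)
    (h : ∀ p ∈ L, (p.1 ≤ s ↔ p.1 ≤ s')) : mOf L s = mOf L s' :=
  mOf_congr_aux L s s' h 0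

theorem posElig_mono (L : List (Int × Int)) {s s' : Int} (hss : s ≤ s')
    (h : posElig L s) : posElig L s' := by
  obtain ⟨p, hp, h1, h2⟩ := h
  exact ⟨p, hp, le_trans h1 hss, h2⟩

-- ---- facts about nOf ----
theorem nOf_le_init (L : List (Int × Int)) (s : Int) (a : Int) :
    L.foldl (fun v p => if p.1 ≤ s then v else min v p.1) a ≤ a := by
  induction L generalizing a with
  | nil => simp
  | cons h t ih =>
    simp only [List.foldl_cons]
    refine le_trans (ih _) ?_
    split <;> simp [min_le_left]

theorem nOf_le_dates (L : List (Int × Int)) (s a : Int) :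
    ∀ p ∈ L, ¬ p.1 ≤ s → L.foldl (fun v p => if p.1 ≤ s then v else min v p.1) a ≤ p.1 := by
  induction L generalizing a with
  | nil => simp
  | cons h t ih =>
    intro p hp hps
    simp only [List.foldl_cons]
    rcases List.mem_cons.mp hp with hp | hp
    · subst hp
      refine le_trans (nOf_le_init t s _) ?_
      simp [hps, min_le_right]
    · exact ih _ p hp hps

theorem nOf_gt (L : List (Int × Int)) (k s a : Int) (ha : s < a)
    (hall : ∀ p ∈ L, ¬ p.1 ≤ s → s < p.1) :
    s < L.foldl (fun v p => if p.1 ≤ s then v else min v p.1) a := by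
  induction L generalizing a with
  | nil => simpa
  | cons h t ih =>
    simp only [List.foldl_cons]
    split
    · exact ih a ha (fun p hp => hall p (by simp [hp]))
    · refine ih _ ?_ (fun p hp => hall p (by simp [hp]))
      have := hall h (by simp) (by assumption)
      omega

-- ---- pushAll characterisation ----
theorem pushAll_eq (dates supplies : List Int) (s : Int) (pq : List Int) :
    pushAll dates supplies s pq =
      pq ++ ((PySem.List.pyRange 0 dates.length 1).filter
              (fun i => decide (PySem.List.pyGetD dates i 0 ≤ s))).map
              (fun i => -(PySem.List.pyGetD supplies i 0)) := by
  have := PySem.List.foldl_append_if (fun i => decide (PySem.List.pyGetD dates i 0 ≤ s))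
    (fun i => -(PySem.List.pyGetD supplies i 0)) (PySem.List.pyRange 0 dates.length 1) pq
  simpa [pushAll] using this

theorem mem_pushAll (dates supplies : List Int) (k s : Int) (pq : List Int)
    (hsafe : ∀ i, supplies.length ≤ i → i < dates.length → k ≤ dates.getD i 0)
    (hs : s < k) (x : Int) :
    x ∈ pushAll dates supplies s pq ↔
      x ∈ pq ∨ ∃ p ∈ dates.zip supplies, p.1 ≤ s ∧ x = -p.2 := by
  rw [pushAll_eq]
  simp only [List.mem_append, List.mem_map, List.mem_filter, decide_eq_true_eq]
  constructor
  · rintro (hx | ⟨i, ⟨hir, hile⟩, hx⟩)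
    · exact Or.inl hx
    · right
      rw [PySem.List.mem_pyRange_one] at hir
      obtain ⟨hi0, hin⟩ := hir
      set j := i.toNat with hj
      have hji : (j : Int) = i := Int.toNat_of_nonneg hi0
      have hjd : j < dates.length := by omega
      have hget : PySem.List.pyGetD dates i 0 = dates.getD j 0 := by
        rw [← hji, PySem.List.pyGetD_natCast]
      have hjs : j < supplies.length := by
        by_contra hns
        have := hsafe j (by omega) hjd
        rw [hget] at hile
        omega
      refine ⟨(dates[j], supplies[j]), ?_, ?_, ?_⟩
      · have hzl : j < (dates.zip supplies).length := by
          rw [List.length_zip]; omega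
        have : (dates.zip supplies)[j] = (dates[j], supplies[j]) := List.getElem_zip
        rw [← this]; exact List.getElem_mem hzl
      · rw [hget, List.getD_eq_getElem dates 0 hjd] at hile; exact hile
      · have hsg : PySem.List.pyGetD supplies i 0 = supplies[j] := by
          rw [← hji, PySem.List.pyGetD_natCast, List.getD_eq_getElem supplies 0 hjs]
        simp only [← hx, hsg]
  · rintro (hx | ⟨p, hp, hps, hx⟩)
    · exact Or.inl hx
    · right
      obtain ⟨j, hjl, hpj⟩ := List.getElem_of_mem hp
      rw [List.length_zip] at hjl
      have hpj' : p = (dates[j]'(by omega), supplies[j]'(by omega)) := by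
        rw [← hpj]; exact List.getElem_zip
      refine ⟨(j : Int), ⟨?_, ?_⟩, ?_⟩
      · rw [PySem.List.mem_pyRange_one]; constructor <;> [omega; exact_mod_cast (by omega : j < dates.length)]
      · rw [PySem.List.pyGetD_natCast, List.getD_eq_getElem dates 0 (by omega)]
        rw [hpj'] at hps; exact hps
      · rw [PySem.List.pyGetD_natCast, List.getD_eq_getElem supplies 0 (by omega)]
        rw [hpj'] at hx; simp at hx; omega

theorem min?_eq_of (xs : List Int) (v : Int) (hv : v ∈ xs)
    (hmin : ∀ y ∈ xs, v ≤ y) : PySem.List.min? xs (fun x => x) = some v := by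
  cases hm : PySem.List.min? xs (fun x => x) with
  | none =>
    rw [PySem.List.min?_eq_none_iff] at hm
    subst hm; cases hv
  | some w =>
    have hw1 : w ∈ xs := PySem.List.min?_mem hm
    have hw2 : w ≤ v := PySem.List.min?_isMin hm v hv
    have hw3 : v ≤ w := hmin w hw1
    rw [le_antisymm hw2 hw3]

-- short forms for loops stopped above k
theorem runG_of_ge (L : List (Int × Int)) (k : Int) (f : Nat) (s r : Int)
    (h : ¬ s < k) : runG L k f s r = r := by
  cases f <;> simp [runG, h]

-- ---- A agrees with the reference loop ----
theorem runA_eq_runG (dates supplies : List Int) (k : Int)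
    (hsafe : ∀ i, supplies.length ≤ i → i < dates.length → k ≤ dates.getD i 0) :
    ∀ (f : Nat) (s : Int) (pq : List Int) (r : Int),
      (k - s).toNat ≤ f →
      posElig (dates.zip supplies) s →
      (∀ x ∈ pq, ∃ p ∈ dates.zip supplies, p.1 ≤ s ∧ x = -p.2) →
      runA dates supplies k f s pq r = runG (dates.zip supplies) k f s r := by
  intro f
  induction f with
  | zero => intro s pq r _ _ _; rfl
  | succ f ih =>
    intro s pq r hf hpe hinv
    by_cases hs : s < k
    · set L := dates.zip supplies with hL
      set m := mOf L s with hm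
      have hmpos : 0 < m := mOf_pos L s hpe
      have hmem : ∀ x ∈ pushAll dates supplies s pq, ∃ p ∈ L, p.1 ≤ s ∧ x = -p.2 := by
        intro x hx
        rcases (mem_pushAll dates supplies k s pq hsafe hs x).mp hx with hx | hx
        · exact hinv x hx
        · exact hx
      have hvin : -m ∈ pushAll dates supplies s pq := by
        obtain ⟨p, hp, hps, hpe2⟩ := mOf_mem L s hpe
        exact (mem_pushAll dates supplies k s pq hsafe hs (-m)).mpr
          (Or.inr ⟨p, hp, hps, by rw [hm, hpe2]⟩)
      have hlb : ∀ y ∈ pushAll dates supplies s pq, -m ≤ y := by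
        intro y hy
        obtain ⟨p, hp, hps, hye⟩ := hmem y hy
        have := mOf_le L s p hp hps
        omega
      have hminEq : PySem.List.min? (pushAll dates supplies s pq) (fun x => x) = some (-m) :=
        min?_eq_of _ _ hvin hlb
      have hstepA : runA dates supplies k (f+1) s pq r =
          runA dates supplies k f (s + m) ((pushAll dates supplies s pq).erase (-m)) (r + 1) := by
        simp only [runA, if_pos hs, hminEq]
        norm_num
      rw [hstepA]
      have hstepG : runG L k (f+1) s r = runG L k f (s + m) (r + 1) := by
        simp only [runG, if_pos hs]
        rw [hm]
      rw [hstepG]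
      exact ih (s + m) _ (r + 1) (by omega) (posElig_mono L (by omega) hpe)
        (fun x hx => by
          obtain ⟨p, hp, hps, hxe⟩ := hmem x (List.mem_of_mem_erase hx)
          exact ⟨p, hp, by omega, hxe⟩)
    · simp [runA, runG, hs]

-- ---- fuel-insensitivity of the reference loop ----
theorem runG_fuel (L : List (Int × Int)) (k : Int) :
    ∀ (f f' : Nat) (s r : Int), (k - s).toNat ≤ f → (k - s).toNat ≤ f' →
      posElig L s → runG L k f s r = runG L k f' s r := by
  intro f
  induction f with
  | zero =>
    intro f' s r hf hf' _
    have hs : ¬ s < k := by omega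
    rw [runG_of_ge L k 0 s r hs, runG_of_ge L k f' s r hs]
  | succ f ih =>
    intro f' s r hf hf' hpe
    by_cases hs : s < k
    · obtain ⟨f'', rfl⟩ : ∃ f'', f' = f'' + 1 := by
        cases f' with
        | zero => omega
        | succ n => exact ⟨n, rfl⟩
      have hmpos : 0 < mOf L s := mOf_pos L s hpe
      simp only [runG, if_pos hs]
      exact ih f'' (s + mOf L s) (r + 1) (by omega) (by omega)
        (posElig_mono L (by omega) hpe)
    · rw [runG_of_ge L k _ s r hs, runG_of_ge L k f' s r hs]

-- ---- the reference loop crosses a constant-increment segment in bulk ----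
theorem runG_seg (L : List (Int × Int)) (k m : Int) (hmpos : 0 < m) :
    ∀ (c : Nat) (s r : Int),
      posElig L s →
      (∀ j : Nat, j < c → mOf L (s + j * m) = m ∧ s + j * m < k) →
      runG L k (k - s).toNat s r = runG L k (k - (s + c * m)).toNat (s + c * m) (r + c) := by
  intro c
  induction c with
  | zero => intro s r _ _; norm_num
  | succ c ih =>
    intro s r hpe H
    have h0 := H 0 (by omega)
    rw [Int.natCast_zero, zero_mul, add_zero] at h0
    obtain ⟨hm0, hsk⟩ := h0
    obtain ⟨t, ht⟩ : ∃ t, (k - s).toNat = t + 1 := ⟨(k - s).toNat - 1, by omega⟩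
    have hstep : runG L k ((k - s).toNat) s r = runG L k t (s + m) (r + 1) := by
      rw [ht]; simp only [runG, if_pos hsk, hm0]
    rw [hstep]
    have hpe' : posElig L (s + m) := posElig_mono L (by omega) hpe
    have hfix : runG L k t (s + m) (r + 1) = runG L k (k - (s + m)).toNat (s + m) (r + 1) :=
      runG_fuel L k t _ (s + m) (r + 1) (by omega) (by omega) hpe'
    rw [hfix]
    have H' : ∀ j : Nat, j < c → mOf L (s + m + j * m) = m ∧ s + m + j * m < k := by
      intro j hj
      have := H (j + 1) (by omega)
      have harith : s + (((j : Nat) + 1 : Nat) : Int) * m = s + m + (j : Int) * m := by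
        push_cast; ring
      rw [harith] at this
      exact this
    have := ih (s + m) (r + 1) hpe' H'
    rw [this]
    have e1 : s + m + (c : Int) * m = s + ((c : Nat) + 1 : Nat) * m := by push_cast; ring
    have e2 : r + 1 + (c : Int) = r + ((c : Nat) + 1 : Nat) := by push_cast; ring
    rw [e1, e2]

-- ---- scanB computes (mOf, nOf) ----
theorem scanB_aux (stock : Int) (L : List (Int × Int)) :
    ∀ ab : Int × Int,
      L.foldl (fun acc p =>
        if p.1 ≤ stock then (if acc.1 < p.2 then (p.2, acc.2) else acc)
        else if p.1 < acc.2 then (acc.1, p.1) else acc) ab =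
      (L.foldl (fun m p => if p.1 ≤ stock then max m p.2 else m) ab.1,
       L.foldl (fun v p => if p.1 ≤ stock then v else min v p.1) ab.2) := by
  induction L with
  | nil => intro ab; rfl
  | cons h t ih =>
    intro ab
    simp only [List.foldl_cons]
    by_cases hc : h.1 ≤ stock
    · rw [if_pos hc, if_pos hc, if_pos hc]
      have : (if ab.1 < h.2 then (h.2, ab.2) else ab) = (max ab.1 h.2, ab.2) := by
        split
        · simp; omega
        · have : max ab.1 h.2 = ab.1 := by omega
          rw [this]
      rw [this, ih]
    · rw [if_neg hc, if_neg hc, if_neg hc]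
      have : (if h.1 < ab.2 then (ab.1, h.1) else ab) = (ab.1, min ab.2 h.1) := by
        split
        · simp; omega
        · have : min ab.2 h.1 = ab.2 := by omega
          rw [this]
      rw [this, ih]

theorem scanB_eq (stock k : Int) (L : List (Int × Int)) :
    scanB stock k L = (mOf L stock, nOf L k stock) := by
  unfold scanB mOf nOf
  exact scanB_aux stock L (0, k)

-- ---- B agrees with the reference loop ----
theorem runB_eq_runG (dates supplies : List Int) (k : Int) :
    ∀ (f : Nat) (s r : Int), (k - s).toNat ≤ f →
      posElig (dates.zip supplies) s →
      runB dates supplies k f s r = runG (dates.zip supplies) k (k - s).toNat s r := by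
  intro f
  induction f with
  | zero =>
    intro s r hf _
    have hs : ¬ s < k := by omega
    rw [runG_of_ge _ k _ s r hs]; rfl
  | succ f ih =>
    intro s r hf hpe
    by_cases hs : s < k
    · set L := dates.zip supplies with hL
      set m := mOf L s with hmdef
      set nxt := nOf L k s with hndef
      have hmpos : 0 < m := mOf_pos L s hpe
      have hnk : nxt ≤ k := nOf_le_init L s k
      have hsn : s < nxt := by
        rw [hndef]
        exact nOf_gt L k s k hs (fun p _ hp => by omega)
      set steps := -(PySem.Int.floordiv (s - nxt) m) with hstepsdef
      have hceil : (steps - 1) * m < nxt - s ∧ nxt - s ≤ steps * m := by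
        have h1 : s - nxt = -(nxt - s) := by ring
        have := (PySem.Int.neg_floordiv_neg_eq_iff_of_pos (a := nxt - s) (b := m)
          (q := steps) hmpos).mp (by rw [hstepsdef, h1])
        exact this
      have hq1 : 1 ≤ steps := by
        by_contra hcon
        have hsle : steps ≤ 0 := by omega
        have : steps * m ≤ 0 := mul_nonpos_of_nonpos_of_nonneg hsle (le_of_lt hmpos)
        omega
      set c := steps.toNat with hcdef
      have hcs : (c : Int) = steps := Int.toNat_of_nonneg (by omega)
      have hseg : ∀ j : Nat, j < c → mOf L (s + j * m) = m ∧ s + j * m < k := by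
        intro j hj
        have hjb : (j : Int) ≤ steps - 1 := by omega
        have hjm : (j : Int) * m ≤ (steps - 1) * m :=
          mul_le_mul_of_nonneg_right hjb (le_of_lt hmpos)
        have hsj : s + (j : Int) * m < nxt := by omega
        have hjm0 : 0 ≤ (j : Int) * m := mul_nonneg (by omega) (le_of_lt hmpos)
        refine ⟨?_, by generalize hJ : (j : Int) * m = J at hsj hjm0 ⊢; omega⟩
        have hcongr : mOf L (s + (j : Int) * m) = mOf L s := by
          refine mOf_congr L _ s (fun p hp => ?_)
          have hnd : ¬ p.1 ≤ s → nxt ≤ p.1 := nOf_le_dates L s k p hp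
          generalize hJ : (j : Int) * m = J at hsj hjm0 ⊢
          constructor
          · intro hle
            by_contra hgt
            have := hnd hgt
            omega
          · intro hle; omega
        rw [hcongr, hmdef]
      set s' := s + steps * m with hs'def
      have hstepB : runB dates supplies k (f+1) s r = runB dates supplies k f s' (r + steps) := by
        simp only [runB, if_pos hs, scanB_eq, ← hL, ← hmdef, ← hndef, ← hstepsdef, ← hs'def]
      rw [hstepB]
      have hsm : steps ≤ steps * m := le_mul_of_one_le_right (by omega) (by omega)
      have hih := ih s' (r + steps) (by omega) (posElig_mono L (by omega) hpe)
      rw [hih]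
      have hsegEq := runG_seg L k m hmpos c s r hpe hseg
      rw [hcs] at hsegEq
      rw [← hs'def] at hsegEq
      exact (hsegEq).symm
    · rw [runG_of_ge _ k _ s r hs]; simp [runB, hs]

-- ===== VERDICT (by name: the statement is the Claim_ definition above) =====
theorem solution_spec : Claim_equal_solution := by
  intro stock dates supplies k _ hpre
  unfold Spec_solution solution solution_alt
  by_cases hk : stock < k
  · obtain ⟨⟨i, hid, his, hdle, hspos⟩, hsafe⟩ := hpre hk
    have hpe : posElig (dates.zip supplies) stock := by
      refine ⟨(dates[i], supplies[i]), ?_, ?_, ?_⟩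
      · have hzl : i < (dates.zip supplies).length := by rw [List.length_zip]; omega
        have : (dates.zip supplies)[i] = (dates[i], supplies[i]) := List.getElem_zip
        rw [← this]; exact List.getElem_mem hzl
      · rw [List.getD_eq_getElem dates 0 hid] at hdle; exact hdle
      · rw [List.getD_eq_getElem supplies 0 his] at hspos; exact hspos
    rw [runA_eq_runG dates supplies k hsafe (k - stock).toNat stock [] 0 (le_refl _) hpe
      (by intro x hx; cases hx)]
    rw [runB_eq_runG dates supplies k (k - stock).toNat stock 0 (le_refl _) hpe]
  · have h0 : (k - stock).toNat = 0 := by omega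
    rw [h0]; rfl
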